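-- pv_equiv track=rewrite | github.com/eiadoumer/MimicHunter | backend/app/hashing/hashing.py | h1
-- ===== SOURCE A (Python) =====
-- def h1(ngram, m=1009):
--     s = " ".join(ngram)
--     result = 0
--     for j in range(len(s)):
--         power = len(s) - 1 - j
--         term = ord(s[j]) * pow(31, power, m)
--         result = (result + term) % m
--     return result
-- ===== SOURCE B (Python) =====
-- def h1(ngram, m=1009):
--     result = 0
--     for c in " ".join(ngram):
--         result = (result * 31 + ord(c)) % m
--     return result
-- ===== Notes on version B (the rewrite author's own statement) =====
-- stated objective: faster
-- what changed: Replaces the per-character modular exponentiation pow(31, n-1-j, m) of the indexed loop by Horner's rule, a single left-to-right pass with result = (result*31 + ord(c)) % m and no power computation.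
-- outside the precondition, e.g. on h1(['x'], 0): A raises ValueError, B raises ZeroDivisionError
import Mathlib
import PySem

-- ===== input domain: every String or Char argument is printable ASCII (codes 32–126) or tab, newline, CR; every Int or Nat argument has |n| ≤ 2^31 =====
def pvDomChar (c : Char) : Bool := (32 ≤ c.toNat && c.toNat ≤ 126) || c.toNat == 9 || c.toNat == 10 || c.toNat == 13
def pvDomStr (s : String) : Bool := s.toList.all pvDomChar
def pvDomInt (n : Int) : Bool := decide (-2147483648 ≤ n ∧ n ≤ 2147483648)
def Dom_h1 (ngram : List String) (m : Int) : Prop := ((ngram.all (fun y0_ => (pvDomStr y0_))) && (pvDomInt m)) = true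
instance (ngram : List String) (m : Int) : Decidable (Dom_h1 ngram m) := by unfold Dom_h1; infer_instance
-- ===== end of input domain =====

-- B replaces A's per-character modular exponentiation by Horner's rule (one pass, no pow); objective: faster.

-- ===== PORT A =====
def h1 (ngram : List String) (m : Int) : Int :=
  let s := PySem.Str.join " " ngram
  (PySem.List.pyRange 0 (PySem.Str.len s) 1).foldl
    (fun result j =>
      let power := PySem.Str.len s - 1 - j
      let term := (((PySem.Str.pyGet? s j).getD ' ').toNat : Int) * PySem.Int.powMod 31 power.toNat m
      PySem.Int.mod (result + term) m) 0

-- ===== PORT B =====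
def h1_alt (ngram : List String) (m : Int) : Int :=
  (PySem.Str.join " " ngram).toList.foldl
    (fun result c => PySem.Int.mod (result * 31 + (c.toNat : Int)) m) 0

-- ===== PRECONDITION & SPEC =====
-- Pre_ excludes exactly the inputs where Python A raises: m = 0 with a nonempty joined string
-- (pow(31, power, 0) raises ValueError); when the joined string is empty (ngram = [] or [""])
-- the loop body never runs and A returns 0 even for m = 0, so those stay inside Pre_.
def Pre_h1 (ngram : List String) (m : Int) : Prop := m ≠ 0 ∨ ngram = [] ∨ ngram = [""]
instance (ngram : List String) (m : Int) : Decidable (Pre_h1 ngram m) := by unfold Pre_h1; infer_instance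
def pvWitness_h1 : List String × Int := (["ab", "c"], 1009)
def Spec_h1 (ngram : List String) (m : Int) (out : Int) : Prop := out = h1_alt ngram m
instance (ngram : List String) (m : Int) (out : Int) : Decidable (Spec_h1 ngram m out) := by unfold Spec_h1; infer_instance

-- ===== CLAIM (what is proved, stated in full; the proofs are below) =====
def Claim_equal_h1 : Prop := ∀ (ngram : List String) (m : Int), Dom_h1 ngram m → Pre_h1 ngram m → Spec_h1 ngram m (h1 ngram m)

-- ===== LEMMAS AND PROOFS =====

-- congruence for Python's floor mod
theorem pv_fmod_congr (m a b : Int) (h : m ∣ a - b) : a.fmod m = b.fmod m := by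
  rw [Int.fmod_eq_fmod_iff_fmod_sub_eq_zero]
  exact Int.fmod_eq_zero_of_dvd h

-- Horner fold with an arbitrary accumulator
theorem pv_horner_acc (l : List Char) : ∀ a : Int,
    l.foldl (fun x c => x * 31 + (c.toNat : Int)) a
      = a * 31 ^ l.length + l.foldl (fun x c => x * 31 + (c.toNat : Int)) 0 := by
  induction l with
  | nil => intro a; simp
  | cons c t ih =>
      intro a
      simp only [List.foldl_cons, List.length_cons, ih (a * 31 + (c.toNat : Int)),
        ih ((0 : Int) * 31 + (c.toNat : Int))]
      ring

-- a fold that reduces mod m at every step equals the plain fold reduced once (A's loop shape)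
theorem pv_modfold_A (m : Int) (e : Int → Nat) : ∀ (E : List (Int × Char)) (x : Int),
    E.foldl (fun r p => (r + (p.2.toNat : Int) * (((31 : Int) ^ e p.1).fmod m)).fmod m) (x.fmod m)
      = (E.foldl (fun r p => r + (p.2.toNat : Int) * (31 : Int) ^ e p.1) x).fmod m := by
  intro E
  induction E with
  | nil => intro x; rfl
  | cons p t ih =>
      intro x
      simp only [List.foldl_cons]
      have hstep : (x.fmod m + (p.2.toNat : Int) * (((31 : Int) ^ e p.1).fmod m)).fmod m
          = (x + (p.2.toNat : Int) * (31 : Int) ^ e p.1).fmod m := by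
        apply pv_fmod_congr
        have h1 := Int.dvd_fmod_sub_self (x := x) (m := m)
        have h2 := Int.dvd_fmod_sub_self (x := (31 : Int) ^ e p.1) (m := m)
        have := h1.add (h2.mul_left (p.2.toNat : Int))
        convert this using 1; ring
      rw [hstep, ih]

-- the same for B's loop shape
theorem pv_modfold_B (m : Int) : ∀ (l : List Char) (x : Int),
    l.foldl (fun r c => (r * 31 + (c.toNat : Int)).fmod m) (x.fmod m)
      = (l.foldl (fun r c => r * 31 + (c.toNat : Int)) x).fmod m := by
  intro l
  induction l with
  | nil => intro x; rfl
  | cons c t ih =>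
      intro x
      simp only [List.foldl_cons]
      have hstep : (x.fmod m * 31 + (c.toNat : Int)).fmod m
          = (x * 31 + (c.toNat : Int)).fmod m := by
        apply pv_fmod_congr
        have h1 := Int.dvd_fmod_sub_self (x := x) (m := m)
        have := h1.mul_left (31 : Int)
        convert this using 1; ring
      rw [hstep, ih]

-- A's (un-modded) positional sum over the enumerated string is Horner's value
theorem pv_enum_sum (n : Nat) : ∀ (l : List Char) (s : Nat) (r : Int), s + l.length = n →
    (PySem.List.enumerate l (s : Int)).foldl
        (fun r p => r + (p.2.toNat : Int) * (31 : Int) ^ (((n : Int) - 1 - p.1).toNat)) r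
      = r + l.foldl (fun x c => x * 31 + (c.toNat : Int)) 0 := by
  intro l
  induction l with
  | nil => intro s r _; simp [PySem.List.enumerate_nil]
  | cons c t ih =>
      intro s r h
      rw [PySem.List.enumerate_cons]
      simp only [List.foldl_cons]
      have hcast : ((s : Int) + 1) = ((s + 1 : Nat) : Int) := by push_cast; ring
      have hexp : (((n : Int) - 1 - (s : Int)).toNat) = t.length := by
        simp only [List.length_cons] at h; omega
      rw [hcast, hexp, ih (s + 1) _ (by simp only [List.length_cons] at h ⊢; omega)]
      rw [pv_horner_acc t ((0 : Int) * 31 + (c.toNat : Int))]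
      ring

-- fold over range(len(l)) reading l[j] is a fold over enumerate(l)
theorem pv_fold_range_enum (l : List Char) (F : Int → (Int × Char) → Int) (init : Int) :
    (PySem.List.pyRange 0 (l.length : Int) 1).foldl
        (fun r j => F r (j, PySem.List.pyGetD l j ' ')) init
      = (PySem.List.enumerate l 0).foldl F init := by
  rw [PySem.List.enumerate_eq_map_pyRange (d := ' '), List.foldl_map]
  simp [PySem.List.len_eq]

-- ===== VERDICT (by name: the statement is the Claim_ definition above) =====
theorem h1_spec : Claim_equal_h1 := by
  intro ngram m _ _
  unfold Spec_h1 h1 h1_alt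
  simp only [PySem.Str.len_eq, PySem.Str.pyGet?_eq, PySem.Chars.pyGet?_eq_listPyGet?,
    PySem.Int.powMod, PySem.Int.mod]
  set l := (PySem.Str.join " " ngram).toList with hl
  -- A side: fold over range → fold over enumerate
  have hA : (PySem.List.pyRange 0 (l.length : Int) 1).foldl
      (fun result j => (result + ((PySem.List.pyGet? l j).getD ' ').toNat *
        ((31 : Int) ^ ((l.length : Int) - 1 - j).toNat).fmod m).fmod m) 0
      = (PySem.List.enumerate l 0).foldl
      (fun r p => (r + (p.2.toNat : Int) * (((31 : Int) ^ (((l.length : Int) - 1 - p.1).toNat)).fmod m)).fmod m) 0 := by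
    exact pv_fold_range_enum l
      (fun r p => (r + (p.2.toNat : Int) * (((31 : Int) ^ (((l.length : Int) - 1 - p.1).toNat)).fmod m)).fmod m) 0
  rw [hA]
  have hMA := pv_modfold_A m (fun j => ((l.length : Int) - 1 - j).toNat) (PySem.List.enumerate l 0) 0
  beta_reduce at hMA
  rw [Int.zero_fmod] at hMA
  have hMB := pv_modfold_B m l 0
  rw [Int.zero_fmod] at hMB
  rw [hMA, hMB]
  have hE := pv_enum_sum l.length l 0 0 (by omega)
  norm_num at hE
  rw [hE]
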